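-- pv_equiv track=rewrite | github.com/NikLaz25/Training_1 | task_25_1.py | TransformTransform
-- ===== SOURCE A (Python) =====
-- def TransformTransform(A, N):
--     '''алгоритм поиска ключевого ключа'''
--     def Transform_one(A):
--         '''трансформация при len(A) == 1'''
--         B = []
--         for i in range(len(A)):
--             for j in range(len(A)):
--                 k = i + j
--                 try:
--                     B += [(A[0])]
--                 except:
--                     pass
--         return B
--
--     def Transform(A):
--         '''трансформация при len(A) > 1'''
--         B = []
--         for i in range(len(A) - 1):
--             for j in range(len(A) - 1):
--                 k = i + j
--                 try:
--                     B += [max(A[j : k])]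
--                 except:
--                     pass
--         return B
--
--     if len(A) <= 1:
--         B = Transform_one(Transform_one(A))
--     else:
--         B = Transform(Transform(A))
--
--     if sum(B) % 2 == 0:
--         return True
--     else:
--         return False
-- ===== SOURCE B (Python) =====
-- def TransformTransform(A, N):
--     '''Same result via running range-maxima (no per-entry slice rescans).'''
--     def step(C):
--         # C -> [max(C[j:j+i] clamped) for i in 1..len(C)-2 for j in 0..len(C)-2]
--         m = len(C)
--         if m < 3:
--             return []
--         R = C[:m - 1]          # row i = 1: singleton maxima
--         out = list(R)
--         for i in range(2, m - 1):
--             R = [max(r, C[j + i - 1]) if j + i - 1 < m else r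
--                  for j, r in enumerate(R)]
--             out += R
--         return out
--
--     if len(A) <= 1:
--         return sum(A) % 2 == 0
--     return sum(step(step(A))) % 2 == 0
-- ===== Notes on version B (the rewrite author's own statement) =====
-- stated objective: faster
-- what changed: B computes each transform's rows of range maxima with a running maximum carried from the previous row (and reduces the len<=1 case to the parity of sum(A)), instead of A's rescanning every slice with max() inside a doubly nested loop at both levels.
import Mathlib
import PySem

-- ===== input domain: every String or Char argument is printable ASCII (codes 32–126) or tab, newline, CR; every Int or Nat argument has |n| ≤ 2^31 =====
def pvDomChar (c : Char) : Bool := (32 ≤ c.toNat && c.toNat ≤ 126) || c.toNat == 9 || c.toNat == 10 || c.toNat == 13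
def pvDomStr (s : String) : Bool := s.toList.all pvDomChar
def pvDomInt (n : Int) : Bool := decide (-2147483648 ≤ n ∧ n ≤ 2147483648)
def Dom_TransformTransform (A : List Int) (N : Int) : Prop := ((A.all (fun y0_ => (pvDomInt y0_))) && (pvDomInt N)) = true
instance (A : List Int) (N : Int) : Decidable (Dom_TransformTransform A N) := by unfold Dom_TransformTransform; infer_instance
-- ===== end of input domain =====

-- B replaces the per-entry slice rescans of A's range-maxima transform by rows of running maxima
-- (and the trivial len≤1 case by the parity of sum(A) directly); objective: faster.

-- ===== PORT A =====
-- Transform_one: appends A[0] len(A)^2 times (the try/except never fires when the loop runs)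
def pvTransformOne (A : List Int) : List Int :=
  (PySem.List.pyRange 0 (A.length : Int) 1).foldl (fun B _i =>
    (PySem.List.pyRange 0 (A.length : Int) 1).foldl (fun B _j =>
      match PySem.List.pyGet? A 0 with
      | some v => B ++ [v]
      | none => B) B) []

-- Transform: B += [max(A[j:i+j])], the bare except swallowing the ValueError of max([]) (none case)
def pvTransformA (A : List Int) : List Int :=
  (PySem.List.pyRange 0 ((A.length : Int) - 1) 1).foldl (fun B i =>
    (PySem.List.pyRange 0 ((A.length : Int) - 1) 1).foldl (fun B j =>
      match PySem.List.max? (PySem.List.slice A (some j) (some (i + j))) (fun y => y) with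
      | some v => B ++ [v]
      | none => B) B) []

def TransformTransform (A : List Int) (N : Int) : Bool :=
  let B := if (A.length : Int) ≤ 1 then pvTransformOne (pvTransformOne A) else pvTransformA (pvTransformA A)
  decide (PySem.Int.mod B.sum 2 = 0)

-- ===== PORT B =====
-- one transform step of Source B: first row = singleton maxima (C[:m-1]), each next row a running max
def pvStep (C : List Int) : List Int :=
  let m := C.length
  if m < 3 then []
  else
    let R := C.take (m - 1)   -- C[:m-1], m ≥ 3 so the bound is nonnegative
    ((PySem.List.pyRange 2 ((m : Int) - 1) 1).foldl
        (fun (p : List Int × List Int) i =>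
          let R' := (PySem.List.enumerate p.1 0).map (fun jr =>
            if jr.1 + i - 1 < (m : Int) then
              max jr.2 (PySem.List.pyGetD C (jr.1 + i - 1) 0)   -- index guarded to be in [0, m)
            else jr.2)
          (R', p.2 ++ R'))
        (R, R)).2

def TransformTransform_alt (A : List Int) (N : Int) : Bool :=
  if (A.length : Int) ≤ 1 then decide (PySem.Int.mod A.sum 2 = 0)
  else decide (PySem.Int.mod (pvStep (pvStep A)).sum 2 = 0)

-- ===== PRECONDITION & SPEC =====
def Spec_TransformTransform (A : List Int) (N : Int) (out : Bool) : Prop := out = TransformTransform_alt A N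
instance (A : List Int) (N : Int) (out : Bool) : Decidable (Spec_TransformTransform A N out) := by unfold Spec_TransformTransform; infer_instance

-- ===== CLAIM (what is proved, stated in full; the proofs are below) =====
def Claim_equal_TransformTransform : Prop := ∀ (A : List Int) (N : Int), Dom_TransformTransform A N → Spec_TransformTransform A N (TransformTransform A N)

-- ===== LEMMAS AND PROOFS =====

-- max of the (clamped) slice C[j:j+i], as the running-max fold Source B maintains
def pvM (C : List Int) (i j : ℕ) : Int := ((C.drop j).take i).foldl max (C.getD j 0)

def pvRow (C : List Int) (i : ℕ) : List Int := (List.range (C.length - 1)).map (pvM C i)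

lemma flatMap_toList {α β : Type} (f : α → Option β) (l : List α) :
    l.flatMap (fun x => (f x).toList) = l.filterMap f := by
  induction l with
  | nil => simp
  | cons x t ih => cases h : f x <;> simp [h, ih]

lemma pvM_succ (C : List Int) (i j : ℕ) :
    pvM C (i + 1) j = match C[j + i]? with
      | some x => max (pvM C i j) x
      | none => pvM C i j := by
  unfold pvM
  rw [List.take_add_one]
  cases h : (C.drop j)[i]? with
  | none =>
    have : C[j + i]? = none := by
      rw [List.getElem?_drop] at h; simpa [Nat.add_comm] using h
    simp [this]
  | some x =>
    have : C[j + i]? = some x := by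
      rw [List.getElem?_drop] at h; simpa [Nat.add_comm] using h
    simp [this, List.foldl_append]

lemma max?_drop_take (C : List Int) (i j : ℕ) (hj : j < C.length) (hi : 1 ≤ i) :
    PySem.List.max? ((C.drop j).take i) (fun y => y) = some (pvM C i j) := by
  obtain ⟨i', rfl⟩ : ∃ i', i = i' + 1 := ⟨i - 1, by omega⟩
  have hd : C.drop j = C[j] :: C.drop (j + 1) := List.drop_eq_getElem_cons hj
  rw [hd, List.take_succ_cons, PySem.List.max?_id_cons]
  unfold pvM
  rw [hd, List.take_succ_cons, List.getD_eq_getElem C 0 hj]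
  simp [List.foldl_cons]

lemma row_one (C : List Int) : pvRow C 1 = C.take (C.length - 1) := by
  apply List.ext_getElem
  · simp [pvRow]
  · intro k h1 h2
    simp only [pvRow, List.getElem_map, List.getElem_range, List.getElem_take]
    have hk : k < C.length - 1 := by simpa [pvRow] using h1
    unfold pvM
    have hd : C.drop k = C[k] :: C.drop (k + 1) := List.drop_eq_getElem_cons (by omega)
    rw [hd, List.take_succ_cons, List.take_zero, List.getD_eq_getElem C 0 (by omega)]
    simp

-- one Source B row update sends row i to row i+1
lemma upd_row (C : List Int) (i : ℕ) :
    (PySem.List.enumerate (pvRow C i) 0).map (fun jr =>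
        if jr.1 + ((i : Int) + 1) - 1 < (C.length : Int) then
          max jr.2 (PySem.List.pyGetD C (jr.1 + ((i : Int) + 1) - 1) 0)
        else jr.2)
      = pvRow C (i + 1) := by
  apply List.ext_getElem
  · simp [PySem.List.length_enumerate, pvRow]
  · intro k h1 h2
    have hk : k < C.length - 1 := by simpa [pvRow] using h2
    simp only [List.getElem_map, PySem.List.getElem_enumerate]
    simp only [pvRow, List.getElem_map, List.getElem_range]
    have harith : (0 : Int) + (k : Int) + ((i : Int) + 1) - 1 = ((k + i : ℕ) : Int) := by push_cast; ring
    rw [harith, pvM_succ]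
    by_cases hlt : k + i < C.length
    · have hc : ((k + i : ℕ) : Int) < (C.length : Int) := by exact_mod_cast hlt
      rw [if_pos hc, PySem.List.pyGetD_natCast, List.getD_eq_getElem C 0 hlt]
      simp [List.getElem?_eq_getElem hlt]
    · have hc : ¬ ((k + i : ℕ) : Int) < (C.length : Int) := by exact_mod_cast hlt
      have hnone : C[k + i]? = none := by rw [List.getElem?_eq_none_iff]; omega
      rw [if_neg hc]
      simp [hnone]

-- the Source B loop over i = i0+1 … i0+k, started at row i0, appends rows i0+1 … i0+k
lemma fold_rows (C : List Int) (k i0 : ℕ) (out : List Int) :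
    ((PySem.List.pyRange ((i0 : Int) + 1) ((i0 : Int) + 1 + k) 1).foldl
        (fun (p : List Int × List Int) i =>
          let R' := (PySem.List.enumerate p.1 0).map (fun jr =>
            if jr.1 + i - 1 < (C.length : Int) then
              max jr.2 (PySem.List.pyGetD C (jr.1 + i - 1) 0)
            else jr.2)
          (R', p.2 ++ R'))
        (pvRow C i0, out))
      = (pvRow C (i0 + k), out ++ (List.range k).flatMap (fun t => pvRow C (i0 + 1 + t))) := by
  induction k generalizing i0 out with
  | zero => simp
  | succ k ih =>
    rw [PySem.List.pyRange_one_cons (by push_cast; omega)]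
    simp only [List.foldl_cons]
    rw [upd_row C i0]
    have hr : ((i0 : Int) + 1) + 1 = ((i0 + 1 : ℕ) : Int) + 1 := by push_cast; ring
    have hr2 : (i0 : Int) + 1 + ((k + 1 : ℕ) : Int) = ((i0 + 1 : ℕ) : Int) + 1 + (k : ℕ) := by push_cast; ring
    rw [hr, hr2, ih (i0 + 1) (out ++ pvRow C (i0 + 1))]
    have hflat : (List.range (k + 1)).flatMap (fun t => pvRow C (i0 + 1 + t))
        = pvRow C (i0 + 1) ++ (List.range k).flatMap (fun t => pvRow C (i0 + 1 + 1 + t)) := by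
      rw [List.range_succ_eq_map, List.flatMap_cons, List.flatMap_map]
      congr 1
      exact List.flatMap_congr (fun t _ => by congr 1; omega)
    simp only [Prod.mk.injEq]
    refine ⟨by congr 1; omega, ?_⟩
    rw [hflat, ← List.append_assoc]

-- the inner loop of A's Transform, as a filterMap over natural j
lemma inner_filterMap (C : List Int) (i : ℕ) (acc : List Int) :
    (List.map (fun k : ℕ => (k : Int)) (List.range (C.length - 1))).foldl (fun B j =>
        match PySem.List.max? (PySem.List.slice C (some j) (some ((i : Int) + j))) (fun y => y) with
        | some v => B ++ [v]
        | none => B) acc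
      = acc ++ (List.range (C.length - 1)).filterMap
          (fun j => PySem.List.max? ((C.drop j).take i) (fun y => y)) := by
  have hfun : ∀ (j : ℕ), PySem.List.slice C (some (j : Int)) (some ((i : Int) + (j : Int))) = (C.drop j).take i := by
    intro j
    rw [Int.add_comm, PySem.List.slice_natCast_add]
  rw [List.foldl_map,
    PySem.List.foldl_congr_mem _ _
      (fun (B : List Int) (j : ℕ) => B ++ (PySem.List.max? ((C.drop j).take i) (fun y => y)).toList)
      acc (by
        intro acc' j hj
        rw [hfun j]
        cases h : PySem.List.max? ((C.drop j).take i) (fun y => y) <;> simp [h]),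
    PySem.List.foldl_append_eq_flatMap]
  congr 1
  exact flatMap_toList _ _

-- the row of A's Transform for i ≥ 1 is the row of running maxima
lemma row_eq (C : List Int) (i : ℕ) (hi : 1 ≤ i) :
    (List.range (C.length - 1)).filterMap (fun j => PySem.List.max? ((C.drop j).take i) (fun y => y))
      = pvRow C i := by
  unfold pvRow
  have h : ∀ j ∈ List.range (C.length - 1),
      PySem.List.max? ((C.drop j).take i) (fun y => y) = some (pvM C i j) := by
    intro j hj
    exact max?_drop_take C i j (by simp at hj; omega) hi
  rw [List.filterMap_congr h]
  rw [show (fun j => some (pvM C i j)) = some ∘ (pvM C i) from rfl, List.filterMap_eq_map]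

-- A's Transform, rewritten as rows of running maxima
lemma transformA_rows (C : List Int) (h3 : 3 ≤ C.length) :
    pvTransformA C = (List.range (C.length - 2)).flatMap (fun t => pvRow C (t + 1)) := by
  unfold pvTransformA
  have hlen : ((C.length : Int) - 1) = ((C.length - 1 : ℕ) : Int) := by omega
  rw [hlen, PySem.List.pyRange_zero_nat, List.foldl_map]
  rw [PySem.List.foldl_congr_mem _ _
      (fun (B : List Int) (i : ℕ) => B ++ (List.range (C.length - 1)).filterMap
        (fun j => PySem.List.max? ((C.drop j).take i) (fun y => y))) _
      (fun acc i _ => inner_filterMap C i acc)]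
  rw [PySem.List.foldl_append_eq_flatMap, List.nil_append]
  set f : ℕ → List Int := fun i => (List.range (C.length - 1)).filterMap
      (fun j => PySem.List.max? ((C.drop j).take i) (fun y => y)) with hf
  rw [show C.length - 1 = (C.length - 2) + 1 from by omega,
    List.range_succ_eq_map, List.flatMap_cons, List.flatMap_map]
  have h0 : f 0 = [] := by rw [hf]; simp [PySem.List.max?]
  rw [h0, List.nil_append]
  apply List.flatMap_congr
  intro t ht
  rw [hf]
  simpa using row_eq C (t + 1) (by omega)

lemma step_eq (C : List Int) : pvStep C = pvTransformA C := by
  by_cases h3 : C.length < 3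
  · unfold pvStep
    rw [if_pos h3]

    rcases C with _ | ⟨a, _ | ⟨b, _ | ⟨c, t⟩⟩⟩
    · simp [pvTransformA, PySem.List.pyRange_one_eq_nil]
    · simp [pvTransformA, PySem.List.pyRange_one_eq_nil]
    · unfold pvTransformA
      norm_num
      rw [PySem.List.pyRange_one_cons (by norm_num), PySem.List.pyRange_one_eq_nil (by norm_num)]
      simp [PySem.List.slice, PySem.List.max?, PySem.List.clampIdx]
    · simp at h3; omega
  · rw [Nat.not_lt] at h3
    rw [transformA_rows C h3]
    unfold pvStep
    dsimp only []
    rw [if_neg (by omega)]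
    rw [← row_one]
    have hcast : ((C.length : Int) - 1) = ((1 : ℕ) : Int) + 1 + ((C.length - 3 : ℕ) : Int) := by omega
    have h2 : (2 : Int) = ((1 : ℕ) : Int) + 1 := by norm_num
    rw [hcast, h2, fold_rows C (C.length - 3) 1 (pvRow C 1)]
    rw [show C.length - 2 = (C.length - 3) + 1 from by omega,
      List.range_succ_eq_map, List.flatMap_cons, List.flatMap_map]
    dsimp only []
    congr 1
    exact List.flatMap_congr (fun t _ => by congr 1; omega)

lemma small_case (A : List Int) (h : (A.length : Int) ≤ 1) :
    pvTransformOne (pvTransformOne A) = A := by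
  rcases A with _ | ⟨a, _ | ⟨b, t⟩⟩
  · simp [pvTransformOne, PySem.List.pyRange_one_eq_nil]
  · have h1 : pvTransformOne [a] = [a] := by
      unfold pvTransformOne
      rw [show ((([a] : List Int).length : Int)) = 1 from by simp]
      rw [PySem.List.pyRange_one_cons (by norm_num), PySem.List.pyRange_one_eq_nil (by norm_num)]
      simp
    rw [h1, h1]
  · simp at h; omega

-- ===== VERDICT (by name: the statement is the Claim_ definition above) =====
theorem TransformTransform_spec : Claim_equal_TransformTransform := by
  intro A N _
  unfold Spec_TransformTransform TransformTransform TransformTransform_alt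
  by_cases h : (A.length : Int) ≤ 1
  · simp [h, small_case A h]
  · simp [h, step_eq]
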